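-- pv_equiv track=rewrite | github.com/Melik159/xp-cgr-replay | vlh/validate_vlh_campaign.py | offsets_to_ranges
-- ===== SOURCE A (Python) =====
-- from typing import Dict, List, Optional, Sequence, Tuple
--
-- def offsets_to_ranges(offsets: Sequence[int]) -> List[Tuple[int, int]]:
--     if not offsets:
--         return []
--     out: List[Tuple[int, int]] = []
--     start = prev = offsets[0]
--     for x in offsets[1:]:
--         if x == prev + 1:
--             prev = x
--             continue
--         out.append((start, prev + 1))
--         start = prev = x
--     out.append((start, prev + 1))
--     return out
-- ===== SOURCE B (Python) =====
-- def offsets_to_ranges(offsets):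
--     # Right-to-left pass: merge each offset into the front range when consecutive.
--     out = []
--     for x in reversed(offsets):
--         if out and out[-1][0] == x + 1:
--             out[-1] = (x, out[-1][1])
--         else:
--             out.append((x, x + 1))
--     out.reverse()
--     return out
-- ===== Notes on version B (the rewrite author's own statement) =====
-- stated objective: alternative
-- what changed: Replaces the left-to-right start/prev state machine with a right-to-left pass that merges each offset into the head range of the result when consecutive (build-back-to-front fold), same O(n) cost.
import Mathlib
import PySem

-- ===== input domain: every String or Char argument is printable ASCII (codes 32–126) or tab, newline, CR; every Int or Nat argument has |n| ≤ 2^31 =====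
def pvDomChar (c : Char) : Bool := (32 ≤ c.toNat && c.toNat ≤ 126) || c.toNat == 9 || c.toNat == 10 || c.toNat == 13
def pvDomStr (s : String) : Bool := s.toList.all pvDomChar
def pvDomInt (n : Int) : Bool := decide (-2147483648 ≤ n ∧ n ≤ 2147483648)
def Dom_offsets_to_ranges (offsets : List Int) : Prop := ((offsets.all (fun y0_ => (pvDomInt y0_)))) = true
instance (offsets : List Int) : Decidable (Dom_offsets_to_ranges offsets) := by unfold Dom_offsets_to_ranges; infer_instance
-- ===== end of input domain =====

-- B replaces A's left-to-right start/prev state machine with a right-to-left pass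
-- merging each offset into the head range when consecutive (alternative, same cost).

-- ===== PORT A =====
-- A's for-loop over offsets[1:], carrying (out, start, prev), as structural recursion.
def offsetsLoopA (xs : List Int) (out : List (Int × Int)) (start prev : Int) :
    List (Int × Int) :=
  match xs with
  | [] => out ++ [(start, prev + 1)]
  | x :: rest =>
    if x = prev + 1 then offsetsLoopA rest out start x
    else offsetsLoopA rest (out ++ [(start, prev + 1)]) x x

def offsets_to_ranges (offsets : List Int) : List (Int × Int) :=
  match offsets with
  | [] => []
  | o0 :: rest => offsetsLoopA rest [] o0 o0

-- ===== PORT B =====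
-- Source B iterates reversed(offsets), merging into the most-recent range (list head here).
def offsets_to_ranges_alt (offsets : List Int) : List (Int × Int) :=
  offsets.reverse.foldl
    (fun out x =>
      match out with
      | (s, e) :: rest => if s = x + 1 then (x, e) :: rest else (x, x + 1) :: (s, e) :: rest
      | [] => [(x, x + 1)]) []

-- ===== PRECONDITION & SPEC =====
def Spec_offsets_to_ranges (offsets : List Int) (out : List (Int × Int)) : Prop := out = offsets_to_ranges_alt offsets
instance (offsets : List Int) (out : List (Int × Int)) : Decidable (Spec_offsets_to_ranges offsets out) := by unfold Spec_offsets_to_ranges; infer_instance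

-- ===== CLAIM (what is proved, stated in full; the proofs are below) =====
def Claim_equal_offsets_to_ranges : Prop := ∀ (offsets : List Int), Dom_offsets_to_ranges offsets → Spec_offsets_to_ranges offsets (offsets_to_ranges offsets)

-- ===== LEMMAS AND PROOFS =====

-- B's loop body, named.
def stepB (x : Int) (out : List (Int × Int)) : List (Int × Int) :=
  match out with
  | (s, e) :: rest => if s = x + 1 then (x, e) :: rest else (x, x + 1) :: (s, e) :: rest
  | [] => [(x, x + 1)]

lemma alt_eq_foldr (l : List Int) :
    offsets_to_ranges_alt l = l.foldr stepB [] := by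
  simp only [offsets_to_ranges_alt, List.foldl_reverse]; rfl

-- A's pending run (start, prev) absorbed into an already-built suffix result.
def consume (start prev : Int) (l : List (Int × Int)) : List (Int × Int) :=
  match l with
  | (s, e) :: rest => if s = prev + 1 then (start, e) :: rest else (start, prev + 1) :: (s, e) :: rest
  | [] => [(start, prev + 1)]

lemma stepB_eq_consume (x : Int) (l : List (Int × Int)) : stepB x l = consume x x l := by
  cases l with
  | nil => rfl
  | cons p rest => cases p; rfl

lemma loopA_out (xs : List Int) (out : List (Int × Int)) (start prev : Int) :
    offsetsLoopA xs out start prev = out ++ offsetsLoopA xs [] start prev := by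
  induction xs generalizing out start prev with
  | nil => simp [offsetsLoopA]
  | cons x rest ih =>
    simp only [offsetsLoopA]
    split_ifs with h
    · exact ih out start x
    · rw [List.nil_append] at *
      rw [ih (out ++ [(start, prev + 1)]) x x, ih [(start, prev + 1)] x x,
        List.append_assoc]

lemma loopA_consume (xs : List Int) (start prev : Int) :
    offsetsLoopA xs [] start prev = consume start prev (xs.foldr stepB []) := by
  induction xs generalizing start prev with
  | nil => rfl
  | cons x rest ih =>
    by_cases h : x = prev + 1
    · subst h
      simp only [offsetsLoopA, List.foldr]
      rw [ih start (prev + 1)]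
      cases hfr : rest.foldr stepB [] with
      | nil => simp [stepB, consume]
      | cons p tl =>
        obtain ⟨s, e⟩ := p
        by_cases hs : s = prev + 1 + 1 <;> simp [stepB, consume, hs]
    · simp only [offsetsLoopA, List.foldr, if_neg h]
      rw [loopA_out, ih x x, ← stepB_eq_consume]
      cases hfr : rest.foldr stepB [] with
      | nil => simp [stepB, consume, h]
      | cons p tl =>
        obtain ⟨s, e⟩ := p
        by_cases hs : s = x + 1 <;> simp [stepB, consume, h, hs]

-- ===== VERDICT (by name: the statement is the Claim_ definition above) =====
theorem offsets_to_ranges_spec : Claim_equal_offsets_to_ranges := by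
  intro offsets _
  unfold Spec_offsets_to_ranges
  rw [alt_eq_foldr]
  cases offsets with
  | nil => rfl
  | cons o0 rest =>
    simp only [offsets_to_ranges, List.foldr]
    rw [loopA_consume, ← stepB_eq_consume]
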